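-- pv_equiv track=rewrite | github.com/21betmaster-byte/ai-candidate-evaluator | backend/tools/demo_replay.py | _dedup_groups
-- ===== SOURCE A (Python) =====
-- def _dedup_groups(groups: list[dict]) -> list[dict]:
--     """Remove redundant retry attempts — keep only the last attempt per step.
--
--     When a step fails and retries, we want to show the final outcome (success
--     or last failure), not every intermediate crash.
--     """
--     # Walk backwards: for each step, keep the last completed or the very last entry.
--     seen_completed: set[str] = set()
--     result: list[dict] = []
--     for g in reversed(groups):
--         key = g["step"]
--         # Always keep send_email (there can be multiple distinct sends)
--         if key == "send_email":
--             result.append(g)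
--             continue
--         # Always keep email_received / ingest (can appear once per attempt but we want the final)
--         if g["message"] in ("completed",) or not g["message"].startswith("failed"):
--             if key not in seen_completed:
--                 seen_completed.add(key)
--                 result.append(g)
--         else:
--             # Failed entry — only keep if we haven't seen a completed for this step
--             if key not in seen_completed:
--                 result.append(g)
--     result.reverse()
--     return result
-- ===== SOURCE B (Python) =====
-- def _dedup_groups(groups: list[dict]) -> list[dict]:
--     """Keep only the last attempt per step: a group survives iff it is a
--     send_email group or no later group of the same step is completed."""
--     result = []
--     rest = groups
--     for g in groups:
--         rest = rest[1:]  # the groups after g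
--         step = g["step"]
--         if step == "send_email" or not any(
--             h["step"] == step and not h["message"].startswith("failed")
--             for h in rest
--         ):
--             result.append(g)
--     return result
-- ===== Notes on version B (the rewrite author's own statement) =====
-- stated objective: simpler
-- what changed: Replaces the backward walk that threads a seen_completed set (and a final reverse) by a single forward pass that keeps a group iff it is a send_email group or no later group with the same step is completed (a suffix scan).
import Mathlib
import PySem

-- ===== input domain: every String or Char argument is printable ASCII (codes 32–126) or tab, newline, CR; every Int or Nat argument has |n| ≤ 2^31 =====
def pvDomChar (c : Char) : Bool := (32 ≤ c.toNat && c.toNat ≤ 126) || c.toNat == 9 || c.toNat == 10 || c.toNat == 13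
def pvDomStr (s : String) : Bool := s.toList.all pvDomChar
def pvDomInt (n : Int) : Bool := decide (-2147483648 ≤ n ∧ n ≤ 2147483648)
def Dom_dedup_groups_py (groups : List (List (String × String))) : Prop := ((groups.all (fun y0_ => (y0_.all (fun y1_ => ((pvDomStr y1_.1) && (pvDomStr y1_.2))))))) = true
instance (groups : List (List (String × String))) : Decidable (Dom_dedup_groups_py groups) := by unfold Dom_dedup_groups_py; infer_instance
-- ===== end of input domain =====

-- B keeps a group iff it is a send_email group or no later group with the same step is
-- completed (single forward pass with a suffix scan); same return value as A's backward
-- walk with a seen_completed set.  Objective: simpler.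

-- ===== PORT A =====
-- g["step"] / g["message"] are ported as Dict.getD with default "" — exact under
-- Pre_dedup_groups_py, which says exactly that those keys are present where A reads them.
def dedup_groups_py (groups : List (List (String × String))) : List (List (String × String)) :=
  -- seen_completed = set(); result = []; for g in reversed(groups): …; result.reverse()
  let st := groups.reverse.foldl
    (fun (st : PySem.Set String × List (List (String × String))) g =>
      let key := PySem.Dict.getD (PySem.Dict.mk g) "step" ""
      if key = "send_email" then (st.1, st.2 ++ [g])
      else
        let msg := PySem.Dict.getD (PySem.Dict.mk g) "message" ""
        if msg = "completed" ∨ ¬ (PySem.Str.startswith msg "failed" = true) then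
          if ¬ (PySem.Set.contains st.1 key = true) then
            (PySem.Set.add st.1 key, st.2 ++ [g])
          else st
        else
          if ¬ (PySem.Set.contains st.1 key = true) then (st.1, st.2 ++ [g]) else st)
    (PySem.Set.empty, [])
  st.2.reverse

-- ===== PORT B =====
-- B-side helpers (Source B inlines these expressions)
def pvStep (g : List (String × String)) : String := PySem.Dict.getD (PySem.Dict.mk g) "step" ""
def pvFailed (g : List (String × String)) : Bool :=
  PySem.Str.startswith (PySem.Dict.getD (PySem.Dict.mk g) "message" "") "failed"
-- any(h["step"] == step and not h["message"].startswith("failed") for h in rest)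
def pvLaterCompleted (step : String) (rest : List (List (String × String))) : Bool :=
  rest.any (fun h => pvStep h == step && !pvFailed h)

def dedup_groups_py_alt (groups : List (List (String × String))) : List (List (String × String)) :=
  -- result = []; rest = groups; for g in groups: rest = rest[1:]; …
  (groups.foldl
    (fun (st : List (List (String × String)) × List (List (String × String))) g =>
      let rest := PySem.List.slice st.1 (some 1) none
      let step := pvStep g
      if step = "send_email" ∨ ¬ (pvLaterCompleted step rest = true) then
        (rest, st.2 ++ [g])
      else (rest, st.2))
    (groups, [])).2

-- ===== PRECONDITION & SPEC =====
-- Pre_ excludes exactly the inputs where the Python A raises KeyError: a group without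
-- a "step" key, or a non-send_email group without a "message" key.
def Pre_dedup_groups_py (groups : List (List (String × String))) : Prop :=
  ∀ g ∈ groups, (PySem.Dict.get? (PySem.Dict.mk g) "step").isSome = true ∧
    (PySem.Dict.getD (PySem.Dict.mk g) "step" "" ≠ "send_email" → (PySem.Dict.get? (PySem.Dict.mk g) "message").isSome = true)
instance (groups : List (List (String × String))) : Decidable (Pre_dedup_groups_py groups) := by
  unfold Pre_dedup_groups_py; infer_instance

def pvWitness_dedup_groups_py : (List (List (String × String))) :=
  [[("step", "send_email")],
   [("step", "ingest"), ("message", "failed: boom")],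
   [("step", "ingest"), ("message", "completed")]]

def Spec_dedup_groups_py (groups : List (List (String × String))) (out : List (List (String × String))) : Prop := out = dedup_groups_py_alt groups
instance (groups : List (List (String × String))) (out : List (List (String × String))) : Decidable (Spec_dedup_groups_py groups out) := by unfold Spec_dedup_groups_py; infer_instance

-- ===== CLAIM (what is proved, stated in full; the proofs are below) =====
def Claim_equal_dedup_groups_py : Prop := ∀ (groups : List (List (String × String))), Dom_dedup_groups_py groups → Pre_dedup_groups_py groups → Spec_dedup_groups_py groups (dedup_groups_py groups)

-- ===== LEMMAS AND PROOFS =====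

-- What B computes, as a structural recursion.
def keptF : List (List (String × String)) → List (List (String × String))
  | [] => []
  | g :: t =>
    if pvStep g = "send_email" ∨ ¬ (pvLaterCompleted (pvStep g) t = true) then
      g :: keptF t
    else keptF t

-- The set component of A's backward fold.
def setA : List (List (String × String)) → PySem.Set String → PySem.Set String
  | [], S => S
  | g :: r, S =>
    if pvStep g = "send_email" then setA r S
    else if ¬ (pvFailed g = true) then
      (if ¬ (PySem.Set.contains S (pvStep g) = true) then
        setA r (PySem.Set.add S (pvStep g)) else setA r S)
    else setA r S

-- The list component of A's backward fold (in processing order).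
def keptA : List (List (String × String)) → PySem.Set String → List (List (String × String))
  | [], _ => []
  | g :: r, S =>
    if pvStep g = "send_email" then g :: keptA r S
    else if ¬ (pvFailed g = true) then
      (if ¬ (PySem.Set.contains S (pvStep g) = true) then
        g :: keptA r (PySem.Set.add S (pvStep g)) else keptA r S)
    else
      (if ¬ (PySem.Set.contains S (pvStep g) = true) then g :: keptA r S else keptA r S)

theorem condA_eq (g : List (String × String)) :
    ((PySem.Dict.getD (PySem.Dict.mk g) "message" "" = "completed" ∨
      ¬ (PySem.Str.startswith (PySem.Dict.getD (PySem.Dict.mk g) "message" "") "failed" = true))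
      ↔ ¬ (pvFailed g = true)) := by
  unfold pvFailed
  generalize PySem.Dict.getD (PySem.Dict.mk g) "message" "" = m
  constructor
  · rintro (rfl | h)
    · decide
    · exact h
  · intro h; exact Or.inr h

theorem setA_append (a b : List (List (String × String))) (S : PySem.Set String) :
    setA (a ++ b) S = setA b (setA a S) := by
  induction a generalizing S with
  | nil => simp [setA]
  | cons g r ih =>
    simp only [List.cons_append, setA]
    by_cases h1 : pvStep g = "send_email"
    · simp [h1, ih]
    · simp only [h1, if_neg, not_false_iff]
      split_ifs <;> simp [ih]

theorem stepA (st : PySem.Set String × List (List (String × String)))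
    (g : List (String × String)) :
    (if PySem.Dict.getD (PySem.Dict.mk g) "step" "" = "send_email" then (st.1, st.2 ++ [g])
      else
        if PySem.Dict.getD (PySem.Dict.mk g) "message" "" = "completed" ∨
            ¬ (PySem.Str.startswith (PySem.Dict.getD (PySem.Dict.mk g) "message" "") "failed" = true) then
          if ¬ (PySem.Set.contains st.1 (PySem.Dict.getD (PySem.Dict.mk g) "step" "") = true) then
            (PySem.Set.add st.1 (PySem.Dict.getD (PySem.Dict.mk g) "step" ""), st.2 ++ [g])
          else st
        else
          if ¬ (PySem.Set.contains st.1 (PySem.Dict.getD (PySem.Dict.mk g) "step" "") = true) then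
            (st.1, st.2 ++ [g])
          else st)
    = (setA [g] st.1, st.2 ++ keptA [g] st.1) := by
  by_cases h1 : PySem.Dict.getD (PySem.Dict.mk g) "step" "" = "send_email"
  · simp [setA, keptA, pvStep, h1]
  · by_cases h2 : pvFailed g = true
    · have hc : ¬ (PySem.Dict.getD (PySem.Dict.mk g) "message" "" = "completed" ∨
          ¬ (PySem.Str.startswith (PySem.Dict.getD (PySem.Dict.mk g) "message" "") "failed" = true)) := by
        intro h; exact absurd h2 ((condA_eq g).mp h)
      simp only [setA, keptA, pvStep]
      simp only [h1, hc, if_neg, not_false_iff, h2]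
      split_ifs <;> simp_all
    · have hc : (PySem.Dict.getD (PySem.Dict.mk g) "message" "" = "completed" ∨
          ¬ (PySem.Str.startswith (PySem.Dict.getD (PySem.Dict.mk g) "message" "") "failed" = true)) :=
        (condA_eq g).mpr h2
      simp only [setA, keptA, pvStep]
      simp only [h1, if_neg, if_pos, not_false_iff, h2, Bool.not_eq_true]
      split_ifs <;> simp_all

theorem keptA_append (a b : List (List (String × String))) (S : PySem.Set String) :
    keptA (a ++ b) S = keptA a S ++ keptA b (setA a S) := by
  induction a generalizing S with
  | nil => simp [keptA, setA]
  | cons g r ih =>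
    simp only [List.cons_append, keptA, setA]
    by_cases h1 : pvStep g = "send_email"
    · simp [h1, ih]
    · simp only [h1, if_neg, not_false_iff]
      split_ifs <;> simp [ih]

theorem foldA_eq (l : List (List (String × String))) (S : PySem.Set String)
    (res : List (List (String × String))) :
    l.foldl
      (fun (st : PySem.Set String × List (List (String × String))) g =>
        let key := PySem.Dict.getD (PySem.Dict.mk g) "step" ""
        if key = "send_email" then (st.1, st.2 ++ [g])
        else
          let msg := PySem.Dict.getD (PySem.Dict.mk g) "message" ""
          if msg = "completed" ∨ ¬ (PySem.Str.startswith msg "failed" = true) then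
            if ¬ (PySem.Set.contains st.1 key = true) then
              (PySem.Set.add st.1 key, st.2 ++ [g])
            else st
          else
            if ¬ (PySem.Set.contains st.1 key = true) then (st.1, st.2 ++ [g]) else st)
      (S, res) = (setA l S, res ++ keptA l S) := by
  induction l generalizing S res with
  | nil => simp [setA, keptA]
  | cons g r ih =>
    rw [List.foldl_cons]
    simp only []
    rw [stepA (S, res) g, ih, show (g :: r) = [g] ++ r from rfl,
      keptA_append, setA_append, List.append_assoc]

theorem mem_setA (l : List (List (String × String))) (S : PySem.Set String)
    (k : String) (hk : k ≠ "send_email") :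
    k ∈ setA l S ↔ (k ∈ S ∨ pvLaterCompleted k l = true) := by
  induction l generalizing S with
  | nil => simp [setA, pvLaterCompleted]
  | cons g r ih =>
    have hne4 : ∀ x : String, ¬ (x = k) → ¬ (k = x) := fun x h e => h e.symm
    simp only [setA]
    by_cases h1 : pvStep g = "send_email"
    · have hne : ¬ (("send_email" : String) = k) := fun e => hk e.symm
      simp [h1, ih, pvLaterCompleted, hne]
    · by_cases h2 : pvFailed g = true
      · simp [h1, h2, ih, pvLaterCompleted]
      · by_cases h3 : pvStep g ∈ S
        · by_cases h4 : pvStep g = k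
          · subst h4
            simp [h1, h2, h3, ih, pvLaterCompleted]
          · simp [h1, h2, h3, ih, pvLaterCompleted, h4]
        · by_cases h4 : pvStep g = k
          · subst h4
            simp [h1, h2, h3, ih, pvLaterCompleted]
          · simp [h1, h2, h3, ih, pvLaterCompleted, h4, hne4 _ h4]

theorem pvLaterCompleted_reverse (k : String) (l : List (List (String × String))) :
    pvLaterCompleted k l.reverse = pvLaterCompleted k l := by
  simp [pvLaterCompleted]

-- keptF with an extra "already completed" set, matching A's state.
def keptFS : List (List (String × String)) → PySem.Set String → List (List (String × String))
  | [], _ => []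
  | g :: t, S =>
    if pvStep g = "send_email" ∨
        (pvStep g ∉ S ∧ ¬ (pvLaterCompleted (pvStep g) t = true)) then
      g :: keptFS t S
    else keptFS t S

theorem keptA_reverse (l : List (List (String × String))) (S : PySem.Set String) :
    (keptA l.reverse S).reverse = keptFS l S := by
  induction l with
  | nil => simp [keptA, keptFS]
  | cons g t ih =>
    rw [List.reverse_cons, keptA_append, List.reverse_append, ih]
    by_cases h1 : pvStep g = "send_email"
    · simp [keptA, keptFS, h1]
    · have hmem := mem_setA t.reverse S (pvStep g) h1
      rw [pvLaterCompleted_reverse] at hmem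
      by_cases h5 : pvStep g ∈ setA t.reverse S
      · have h6 := hmem.mp h5
        by_cases h2 : pvFailed g = true
        · simp [keptA, keptFS, h1, h2, h5]
          tauto
        · simp [keptA, keptFS, h1, h2, h5]
          tauto
      · have h6 := fun h => h5 (hmem.mpr h)
        have h8 : pvStep g ∉ S := fun h => h6 (Or.inl h)
        have h9 : pvLaterCompleted (pvStep g) t = false := by
          cases hv : pvLaterCompleted (pvStep g) t with
          | false => rfl
          | true => exact (h6 (Or.inr hv)).elim
        by_cases h2 : pvFailed g = true
        · simp [keptA, keptFS, h1, h2, h5, h8, h9]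
        · simp [keptA, keptFS, h1, h2, h5, h8, h9]

theorem keptFS_empty (l : List (List (String × String))) :
    keptFS l PySem.Set.empty = keptF l := by
  induction l with
  | nil => rfl
  | cons g t ih =>
    have ih' : keptFS t [] = keptF t := ih
    simp [keptFS, keptF, ih']

theorem foldB_eq (l res : List (List (String × String))) :
    (l.foldl
      (fun (st : List (List (String × String)) × List (List (String × String))) g =>
        let rest := PySem.List.slice st.1 (some 1) none
        let step := pvStep g
        if step = "send_email" ∨ ¬ (pvLaterCompleted step rest = true) then
          (rest, st.2 ++ [g])
        else (rest, st.2))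
      (l, res)).2 = res ++ keptF l := by
  induction l generalizing res with
  | nil => simp [keptF]
  | cons g t ih =>
    rw [List.foldl_cons]
    simp only []
    rw [PySem.List.slice_from_one, List.tail_cons]
    by_cases h : pvStep g = "send_email" ∨ ¬ (pvLaterCompleted (pvStep g) t = true)
    · rw [if_pos h, ih]
      simp only [keptF]
      rw [if_pos h]
      simp
    · rw [if_neg h, ih]
      simp only [keptF]
      rw [if_neg h]

-- ===== VERDICT (by name: the statement is the Claim_ definition above) =====
theorem dedup_groups_py_spec : Claim_equal_dedup_groups_py := by
  intro groups _ _
  unfold Spec_dedup_groups_py dedup_groups_py dedup_groups_py_alt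
  rw [foldA_eq, foldB_eq]
  simp only [List.nil_append]
  rw [keptA_reverse, keptFS_empty]
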